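-- pv_equiv track=rewrite | github.com/T9404/EGE | Python/ЕГЭ2021;2022/14/Решение заданий. Поляков/3656.py | func
-- ===== SOURCE A (Python) =====
-- def func(number, foundation):
--     count, number_s = 0, ''
--
--     while number:
--         number_s += str(number % foundation)
--         number //= foundation
--
--     number_s = number_s[::-1]
--
--     for i in number_s:
--         if int(i) % 2 != 0:
--             count += 1
--
--     return count
-- ===== SOURCE B (Python) =====
-- def func(number, foundation):
--     # Purely arithmetic: no string buffer, no reversal; count odd *decimal*
--     # digits of each remainder numerically (matches str(rem) for rem >= 0).
--     count = 0
--     while number: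
--         rem = number % foundation
--         while rem:
--             if rem % 10 % 2:
--                 count += 1
--             rem //= 10
--         number //= foundation
--     return count
-- ===== Notes on version B (the rewrite author's own statement) =====
-- stated objective: simpler
-- what changed: B drops A's string buffer and final reversal entirely: instead of rendering every remainder with str(), concatenating, reversing and re-parsing each character with int(), it counts the odd decimal digits of each remainder numerically (rem % 10 % 2, rem //= 10) in one fused pass with a plain integer accumulator.
import Mathlib
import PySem

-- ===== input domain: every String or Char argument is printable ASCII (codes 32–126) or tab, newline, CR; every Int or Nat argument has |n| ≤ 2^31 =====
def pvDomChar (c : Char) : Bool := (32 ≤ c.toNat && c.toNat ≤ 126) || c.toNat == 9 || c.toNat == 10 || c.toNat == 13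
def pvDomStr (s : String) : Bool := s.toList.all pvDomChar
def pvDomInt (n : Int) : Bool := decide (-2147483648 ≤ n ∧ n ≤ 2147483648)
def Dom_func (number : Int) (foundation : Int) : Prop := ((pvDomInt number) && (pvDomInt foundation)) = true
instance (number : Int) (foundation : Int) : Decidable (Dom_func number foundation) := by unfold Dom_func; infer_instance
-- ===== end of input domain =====

-- B drops A's string buffer and reversal and counts odd decimal digits of each remainder
-- purely arithmetically in one fused pass (objective: alternative/simpler).

-- ===== PORT A =====
-- while number: number_s += str(number % foundation); number //= foundation
-- fuel = number.natAbs + 1 suffices on Pre_ (number // foundation strictly decreases there).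
def func_strLoop : Nat → Int → Int → List Char → List Char
  | 0, _, _, s => s
  | f + 1, number, foundation, s =>
    if number = 0 then s
    else func_strLoop f (PySem.Int.floordiv number foundation) foundation
           (s ++ PySem.Int.toChars (PySem.Int.mod number foundation))

-- for i in number_s: if int(i) % 2 != 0: count += 1
-- int(i) is PySem.Int.ofChars? [i]; the `none` branch is Python's ValueError, unreachable on Pre_.
def func_countLoop : List Char → Int → Int
  | [], count => count
  | c :: rest, count =>
    func_countLoop rest
      (match PySem.Int.ofChars? [c] with
       | some v => if PySem.Int.mod v 2 ≠ 0 then count + 1 else count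
       | none => count)

def func (number : Int) (foundation : Int) : Int :=
  -- number_s[::-1] ported as List.reverse (exact for a full step -1 slice)
  func_countLoop (func_strLoop (number.natAbs + 1) number foundation []).reverse 0

-- ===== PORT B =====
-- inner: while rem: if rem % 10 % 2: count += 1; rem //= 10
def func_altDigitLoop : Nat → Int → Int → Int
  | 0, _, count => count
  | f + 1, rem, count =>
    if rem = 0 then count
    else func_altDigitLoop f (PySem.Int.floordiv rem 10)
           (if PySem.Int.mod (PySem.Int.mod rem 10) 2 ≠ 0 then count + 1 else count)

-- outer: while number: rem = number % foundation; <inner>; number //= foundation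
def func_altLoop : Nat → Int → Int → Int → Int
  | 0, _, _, count => count
  | f + 1, number, foundation, count =>
    if number = 0 then count
    else
      -- rem = number % foundation, inlined at its two uses
      func_altLoop f (PySem.Int.floordiv number foundation) foundation
        (func_altDigitLoop ((PySem.Int.mod number foundation).natAbs + 1)
          (PySem.Int.mod number foundation) count)

def func_alt (number : Int) (foundation : Int) : Int :=
  func_altLoop (number.natAbs + 1) number foundation 0

-- ===== PRECONDITION & SPEC =====
-- Exactly the inputs on which the Python A returns: number = 0 (the loop never runs), or
-- number > 0 with foundation ≥ 2.  Elsewhere A raises (ZeroDivisionError for foundation = 0,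
-- ValueError from int('-') when a remainder is negative) or loops forever (foundation = 1,
-- or negative number with foundation ≥ 2).
def Pre_func (number : Int) (foundation : Int) : Prop :=
  number = 0 ∨ (0 < number ∧ 2 ≤ foundation)
instance (number : Int) (foundation : Int) : Decidable (Pre_func number foundation) := by
  unfold Pre_func; infer_instance
def pvWitness_func : Int × Int := (123456, 16)

def Spec_func (number : Int) (foundation : Int) (out : Int) : Prop := out = func_alt number foundation
instance (number : Int) (foundation : Int) (out : Int) : Decidable (Spec_func number foundation out) := by unfold Spec_func; infer_instance

-- ===== CLAIM (what is proved, stated in full; the proofs are below) =====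
def Claim_equal_func : Prop := ∀ (number : Int) (foundation : Int), Dom_func number foundation → Pre_func number foundation → Spec_func number foundation (func number foundation)

-- ===== LEMMAS AND PROOFS =====

-- the char predicate A's counting loop tests
def pvOddChar (c : Char) : Bool :=
  match PySem.Int.ofChars? [c] with
  | some v => decide (PySem.Int.mod v 2 ≠ 0)
  | none => false

-- the numeric odd-decimal-digit count B computes, on Nat
def pvCN (n : Nat) : Nat :=
  if h : n / 10 = 0 then n % 10 % 2
  else n % 10 % 2 + pvCN (n / 10)
decreasing_by exact Nat.div_lt_self (by omega) (by omega)

theorem pvMatchCount (o : Option Int) (count : Int) :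
    (match o with
     | some v => if PySem.Int.mod v 2 ≠ 0 then count + 1 else count
     | none => count) =
    count + (if (match o with
                 | some v => decide (PySem.Int.mod v 2 ≠ 0)
                 | none => false) then (1 : Int) else 0) := by
  rcases o with _ | v
  · simp
  · dsimp only
    by_cases hv : PySem.Int.mod v 2 ≠ 0 <;>
      [rw [if_pos hv]; rw [if_neg hv]] <;> simp <;>
      rw [PySem.Int.mod_eq_emod_of_pos (by norm_num)] at hv <;> omega

theorem pvCountLoop_eq (cs : List Char) (count : Int) :
    func_countLoop cs count = count + (cs.countP pvOddChar : Int) := by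
  induction cs generalizing count with
  | nil => simp [func_countLoop]
  | cons c rest ih =>
    simp only [func_countLoop, List.countP_cons, pvOddChar, pvMatchCount, ih]
    by_cases hc : pvOddChar c <;> simp [pvOddChar] at hc <;> simp [hc] <;> push_cast <;> ring

theorem pvCN_eq (n : Nat) :
    pvCN n = n % 10 % 2 + (if n / 10 = 0 then 0 else pvCN (n / 10)) := by
  conv_lhs => rw [pvCN]
  split_ifs with h <;> simp [h]

theorem pvOddChar_digitChar (d : Nat) (hd : d < 10) :
    pvOddChar (Nat.digitChar d) = decide (d % 2 = 1) := by
  interval_cases d <;> decide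

theorem pvToDigitsCore_countP (f : Nat) :
    ∀ (n : Nat) (acc : List Char), n < f →
      (Nat.toDigitsCore 10 f n acc).countP pvOddChar = pvCN n + acc.countP pvOddChar := by
  induction f with
  | zero => intro n acc h; omega
  | succ f ih =>
    intro n acc h
    rw [Nat.toDigitsCore]
    by_cases h10 : n / 10 = 0
    · rw [if_pos h10, List.countP_cons,
        pvOddChar_digitChar _ (Nat.mod_lt _ (by omega)), pvCN_eq n, if_pos h10]
      rcases Nat.mod_two_eq_zero_or_one (n % 10) with h2 | h2 <;> simp [h2] <;> omega
    · rw [if_neg h10, ih (n / 10) _ (by omega), List.countP_cons,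
        pvOddChar_digitChar _ (Nat.mod_lt _ (by omega)), pvCN_eq n, if_neg h10]
      rcases Nat.mod_two_eq_zero_or_one (n % 10) with h2 | h2 <;> simp [h2] <;> omega

theorem pvToChars_countP (r : Int) (hr : 0 ≤ r) :
    (PySem.Int.toChars r).countP pvOddChar = pvCN r.toNat := by
  rw [PySem.Int.toChars, if_neg (by omega), Nat.toDigits]
  simpa using pvToDigitsCore_countP (r.toNat + 1) r.toNat [] (by omega)

theorem pvDigitLoop_eq (f : Nat) :
    ∀ (m : Nat) (count : Int), m < f →
      func_altDigitLoop f (m : Int) count = count + (pvCN m : Int) := by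
  induction f with
  | zero => intro m count h; omega
  | succ f ih =>
    intro m count h
    by_cases hm : m = 0
    · subst hm; simp [func_altDigitLoop, pvCN]
    · rw [func_altDigitLoop, if_neg (by exact_mod_cast hm)]
      rw [show PySem.Int.floordiv (m : Int) 10 = ((m / 10 : Nat) : Int) from
            PySem.Int.floordiv_natCast m 10,
          show PySem.Int.mod (m : Int) 10 = ((m % 10 : Nat) : Int) from
            PySem.Int.mod_natCast m 10,
          show PySem.Int.mod ((m % 10 : Nat) : Int) 2 = ((m % 10 % 2 : Nat) : Int) from
            PySem.Int.mod_natCast (m % 10) 2,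
          ih (m / 10) _ (by omega), pvCN_eq m]
      by_cases h10 : m / 10 = 0 <;>
        rcases Nat.mod_two_eq_zero_or_one (m % 10) with h2 | h2 <;>
          simp [h2, h10, pvCN_eq 0] <;> push_cast <;> ring

theorem pvStrLoop_acc (f : Nat) :
    ∀ (n fo : Int) (s : List Char),
      func_strLoop f n fo s = s ++ func_strLoop f n fo [] := by
  induction f with
  | zero => intro n fo s; simp [func_strLoop]
  | succ f ih =>
    intro n fo s
    by_cases hn : n = 0
    · simp [func_strLoop, hn]
    · rw [func_strLoop, if_neg hn, ih]
      conv_rhs => rw [func_strLoop, if_neg hn, ih]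
      simp

theorem pvMain (f : Nat) :
    ∀ (n fo count : Int), 0 ≤ n → 2 ≤ fo → n.toNat < f →
      func_altLoop f n fo count =
        count + ((func_strLoop f n fo []).countP pvOddChar : Int) := by
  induction f with
  | zero => intro n fo count _ _ h; omega
  | succ f ih =>
    intro n fo count hn hfo h
    by_cases h0 : n = 0
    · simp [func_altLoop, func_strLoop, h0]
    · have hfo0 : (0 : Int) < fo := by omega
      have hrem : PySem.Int.mod n fo = n % fo := PySem.Int.mod_eq_emod_of_pos hfo0
      have hdiv : PySem.Int.floordiv n fo = n / fo := PySem.Int.floordiv_eq_ediv_of_pos hfo0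
      have hrem0 : (0 : Int) ≤ n % fo := Int.emod_nonneg n (by omega)
      have hdge : (0 : Int) ≤ n / fo := Int.ediv_nonneg hn (by omega)
      have hq : n / fo = ((n.toNat / fo.toNat : Nat) : Int) := by
        conv_lhs => rw [← Int.toNat_of_nonneg hn, ← Int.toNat_of_nonneg (by omega : (0:Int) ≤ fo)]
        exact (Int.natCast_div _ _).symm
      have hqlt : n.toNat / fo.toNat < n.toNat := Nat.div_lt_self (by omega) (by omega)
      rw [func_altLoop, if_neg h0, func_strLoop, if_neg h0, pvStrLoop_acc, List.countP_append,
        hrem, hdiv, List.nil_append]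
      rw [show n % fo = (((n % fo).toNat : Nat) : Int) from (Int.toNat_of_nonneg hrem0).symm]
      simp only [Int.natAbs_natCast]
      rw [pvDigitLoop_eq _ (n % fo).toNat _ (by omega),
        ih _ _ _ hdge hfo (by omega),
        pvToChars_countP _ (by omega)]
      simp only [Int.toNat_natCast]
      push_cast
      ring

-- ===== VERDICT (by name: the statement is the Claim_ definition above) =====
theorem func_spec : Claim_equal_func := by
  intro number foundation _ hpre
  unfold Spec_func func func_alt
  rcases hpre with h0 | ⟨hpos, hfo⟩
  · subst h0; simp [func_strLoop, func_countLoop, func_altLoop]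
  · rw [pvCountLoop_eq, List.countP_reverse,
      pvMain _ _ _ _ (by omega) hfo (by omega)]
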